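-- pv_equiv track=rewrite | github.com/brownjm/praisetex | song.py | contains_only
-- ===== SOURCE A (Python) =====
-- def contains_only(line, letters):
--     """Check if the line only contains these letters"""
--     for c in line:
--         if c.isalnum(): # if character is alphanumeric
--             if c in letters:
--                 continue
--             else: # character not found in letters
--                 return False
--         else: # ignore non-alphanumeric characters
--             continue
--
--     return True
-- ===== SOURCE B (Python) =====
-- def contains_only(line, letters):
--     """Check if the line only contains these letters"""
--     leftover = set(line) - set(letters)
--     return not any(map(str.isalnum, leftover))
-- ===== Notes on version B (the rewrite author's own statement) =====
-- stated objective: alternative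
-- what changed: Inverts the phases: instead of scanning line and testing each alphanumeric character for membership in letters, B first removes all allowed characters via a set difference set(line) - set(letters) and then checks that the leftover contains no alphanumeric character at all.
import Mathlib
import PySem

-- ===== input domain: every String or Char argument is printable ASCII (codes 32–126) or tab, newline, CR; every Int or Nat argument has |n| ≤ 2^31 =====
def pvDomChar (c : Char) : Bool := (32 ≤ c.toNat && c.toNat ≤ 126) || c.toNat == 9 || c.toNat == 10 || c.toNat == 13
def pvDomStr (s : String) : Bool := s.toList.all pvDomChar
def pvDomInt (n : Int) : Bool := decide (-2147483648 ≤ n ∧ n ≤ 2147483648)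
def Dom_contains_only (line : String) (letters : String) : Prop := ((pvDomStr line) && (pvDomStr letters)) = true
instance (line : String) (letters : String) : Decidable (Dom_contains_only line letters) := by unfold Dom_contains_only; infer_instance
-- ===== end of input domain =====

-- B removes the allowed characters first (set difference set(line) - set(letters)) and then checks the leftover for alnum-freeness, instead of A's scan with per-character membership (objective: alternative).


-- ===== PORT A =====
-- the 'for c in line' loop with its early 'return False'
def contains_only_go (letters : List Char) : List Char → Bool
  | [] => true
  | c :: rest =>
    if PySem.Chars.isalnum c then
      if letters.contains c then contains_only_go letters rest
      else false
    else contains_only_go letters rest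

def contains_only (line : String) (letters : String) : Bool :=
  contains_only_go letters.toList line.toList

-- ===== PORT B =====
def contains_only_alt (line : String) (letters : String) : Bool :=
  let leftover : PySem.Set Char :=
    PySem.Set.diff (PySem.Set.ofList line.toList) (PySem.Set.ofList letters.toList)
  !(leftover.any PySem.Chars.isalnum)

-- ===== PRECONDITION & SPEC =====
def Spec_contains_only (line : String) (letters : String) (out : Bool) : Prop := out = contains_only_alt line letters
instance (line : String) (letters : String) (out : Bool) : Decidable (Spec_contains_only line letters out) := by unfold Spec_contains_only; infer_instance

-- ===== CLAIM (what is proved, stated in full; the proofs are below) =====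
def Claim_equal_contains_only : Prop := ∀ (line : String) (letters : String), Dom_contains_only line letters → Spec_contains_only line letters (contains_only line letters)

-- ===== LEMMAS AND PROOFS =====
theorem contains_only_go_eq_all (letters : List Char) (l : List Char) :
    contains_only_go letters l
      = l.all (fun c => !PySem.Chars.isalnum c || letters.contains c) := by
  induction l with
  | nil => rfl
  | cons c rest ih =>
    simp only [contains_only_go, List.all_cons]
    split_ifs with h1 h2 <;> simp [h1, ih] <;> simp_all

-- ===== VERDICT (by name: the statement is the Claim_ definition above) =====
theorem contains_only_spec : Claim_equal_contains_only := by
  intro line letters _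
  unfold Spec_contains_only contains_only contains_only_alt
  rw [contains_only_go_eq_all, Bool.eq_iff_iff]
  simp only [List.all_eq_true, Bool.not_eq_eq_eq_not, Bool.not_true, List.any_eq_false]
  constructor
  · intro h x hx
    have hx' : x ∈ line.toList ∧ x ∉ letters.toList := by
      simpa [PySem.Set.mem_diff, PySem.Set.mem_ofList] using hx
    have hh := h x hx'.1
    rw [Bool.or_eq_true] at hh
    rcases hh with h' | h'
    · simpa using h'
    · exact absurd (by simpa using h') hx'.2
  · intro h c hc
    by_cases hm : c ∈ letters.toList
    · simp [hm]
    · have hd : c ∈ PySem.Set.diff (PySem.Set.ofList line.toList) (PySem.Set.ofList letters.toList) := by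
        simp [PySem.Set.mem_diff, PySem.Set.mem_ofList, hc, hm]
      simp [h c hd]
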